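-- pv_equiv track=rewrite | github.com/oediaz/REDU2016-13 | redu/src/main/webapp/InferenciasExperto/ComplementoWeb/InfExperto2/lecturaword.py | separar_por_comas
-- ===== SOURCE A (Python) =====
-- def separar_por_comas(frase):
--     m=[]
--     n=[]
--     for i in frase:
--         #Si tiene ',', 'y' o 'o' separar en otro array
--         #Ejemplo: frio,caliente omedio templado
--         #[[frio],[caliente],[[medio],[templado]]]
--         if i==',' or i=='y':
--             m.append(n)
--             n=[]
--         else:
--             #El o cuenta como palabra para saber si esta parte de la inferencia se refiere a una conjuncion
--             if  i=='o' :
--                 m.append([i])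
--                 m.append(n)
--                 n=[]
--             else:
--                 n.append(i)
--     m.append(n)
--     temp=""
--     l=[]
--     #Unimos palabras con el ejemplo anterior uniriamos de esta forma mediotemplado
--     for i in m:
--         for j in i:
--             temp=temp+str(j)
--         l.append(temp)
--         temp=""
--     m=l
--     return m
-- ===== SOURCE B (Python) =====
-- def separar_por_comas(frase):
--     l = []
--     temp = ""
--     for i in frase:
--         if i == ',' or i == 'y':
--             l.append(temp)
--             temp = ""
--         elif i == 'o':
--             l.append("o")
--             l.append(temp)
--             temp = ""
--         else:
--             temp += str(i)
--     l.append(temp)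
--     return l
-- ===== Notes on version B (the rewrite author's own statement) =====
-- stated objective: simpler
-- what changed: B accumulates the current token directly as a string in one pass, eliminating A's list-of-lists intermediate and its entire second join loop.
import Mathlib
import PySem

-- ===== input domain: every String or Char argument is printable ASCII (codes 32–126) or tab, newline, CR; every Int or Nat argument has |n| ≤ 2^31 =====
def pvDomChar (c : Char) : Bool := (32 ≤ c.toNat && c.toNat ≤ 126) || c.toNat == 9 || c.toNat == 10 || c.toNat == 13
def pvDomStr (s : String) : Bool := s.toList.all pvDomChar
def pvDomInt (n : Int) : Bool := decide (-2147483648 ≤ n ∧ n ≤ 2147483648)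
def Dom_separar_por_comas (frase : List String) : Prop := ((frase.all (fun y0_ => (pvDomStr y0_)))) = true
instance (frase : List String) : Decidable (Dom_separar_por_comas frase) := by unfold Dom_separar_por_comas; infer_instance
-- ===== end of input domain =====

-- B replaces A's list-of-lists intermediate and second join loop with a single
-- pass that accumulates the current token directly as a string (objective: simpler).


-- ===== PORT A =====
-- first loop of A: state (m, n); branch order as in the Python
def pvStepA (mn : List (List String) × List String) (i : String) :
    List (List String) × List String :=
  if i == "," || i == "y" then (mn.1 ++ [mn.2], [])
  else if i == "o" then (mn.1 ++ [[i]] ++ [mn.2], [])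
  else (mn.1, mn.2 ++ [i])

-- inner join loop of A: temp = temp + str(j) over a group (str(j) = j for strings)
def pvJoin (g : List String) : String := g.foldl (fun t j => t ++ j) ""

def separar_por_comas (frase : List String) : List String :=
  let mn := frase.foldl pvStepA ([], [])
  let m := mn.1 ++ [mn.2]
  m.foldl (fun l i => l ++ [pvJoin i]) []

-- ===== PORT B =====
-- B's single loop: state (l, temp)
def pvStepB (lt : List String × String) (i : String) : List String × String :=
  if i == "," || i == "y" then (lt.1 ++ [lt.2], "")
  else if i == "o" then (lt.1 ++ ["o", lt.2], "")
  else (lt.1, lt.2 ++ i)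

def separar_por_comas_alt (frase : List String) : List String :=
  let lt := frase.foldl pvStepB ([], "")
  lt.1 ++ [lt.2]

-- ===== PRECONDITION & SPEC =====
def Spec_separar_por_comas (frase : List String) (out : List String) : Prop := out = separar_por_comas_alt frase
instance (frase : List String) (out : List String) : Decidable (Spec_separar_por_comas frase out) := by unfold Spec_separar_por_comas; infer_instance

-- ===== CLAIM (what is proved, stated in full; the proofs are below) =====
def Claim_equal_separar_por_comas : Prop := ∀ (frase : List String), Dom_separar_por_comas frase → Spec_separar_por_comas frase (separar_por_comas frase)

-- ===== LEMMAS AND PROOFS =====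
theorem pvJoin_append (g : List String) (i : String) :
    pvJoin (g ++ [i]) = pvJoin g ++ i := by
  simp [pvJoin]

theorem pvFinishA_append (m : List (List String)) (g : List (List String)) :
    (m ++ g).foldl (fun l i => l ++ [pvJoin i]) [] =
      m.foldl (fun l i => l ++ [pvJoin i]) [] ++ g.map pvJoin := by
  induction g generalizing m with
  | nil => simp
  | cons a g ih =>
      rw [show m ++ a :: g = (m ++ [a]) ++ g by simp, ih]
      simp [List.foldl_append]

-- main invariant: B's state mirrors A's state through pvJoin
theorem pv_invariant (frase : List String) (m : List (List String)) (n : List String) :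
    frase.foldl pvStepB (m.map pvJoin, pvJoin n)
      = ((frase.foldl pvStepA (m, n)).1.map pvJoin, pvJoin (frase.foldl pvStepA (m, n)).2) := by
  induction frase generalizing m n with
  | nil => simp
  | cons i fr ih =>
      simp only [List.foldl_cons]
      by_cases h1 : i == "," || i == "y"
      · rw [show pvStepB (m.map pvJoin, pvJoin n) i = ((m ++ [n]).map pvJoin, pvJoin []) by
          simp [pvStepB, h1, pvJoin]]
        rw [ih]
        simp [pvStepA, h1]
      · by_cases h2 : i == "o"
        · have hi : i = "o" := by simpa using h2
          rw [show pvStepB (m.map pvJoin, pvJoin n) i = ((m ++ [[i]] ++ [n]).map pvJoin, pvJoin []) by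
            simp [pvStepB, pvJoin, hi]]
          rw [ih]
          simp [pvStepA, h1, h2]
        · rw [show pvStepB (m.map pvJoin, pvJoin n) i = (m.map pvJoin, pvJoin (n ++ [i])) by
            simp [pvStepB, h1, h2, pvJoin_append]]
          rw [ih]
          simp [pvStepA, h1, h2]

-- ===== VERDICT (by name: the statement is the Claim_ definition above) =====
theorem separar_por_comas_spec : Claim_equal_separar_por_comas := by
  intro frase _
  unfold Spec_separar_por_comas separar_por_comas separar_por_comas_alt
  have h := pv_invariant frase [] []
  simp only [List.map_nil, show pvJoin [] = "" by rfl] at h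
  rw [h]
  simpa using pvFinishA_append [] ((frase.foldl pvStepA ([], [])).1 ++ [(frase.foldl pvStepA ([], [])).2])
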